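-- pv_equiv track=rewrite | github.com/HDC-BE-REAL/ESG_Dashboard | src/table_ocr.py | parse_pages_arg
-- ===== SOURCE A (Python) =====
-- from typing import Iterable, List
--
-- def parse_pages_arg(pages_arg: str, available: Iterable[int]) -> list[int]:
--     avail_set = set(available)
--     selected: set[int] = set()
--     for raw in pages_arg.split(","):
--         part = raw.strip()
--         if not part:
--             continue
--         if "-" in part:
--             start_str, end_str = part.split("-", 1)
--             start = int(start_str)
--             end = int(end_str)
--             if start > end:
--                 start, end = end, start
--             selected.update(range(start, end + 1))
--         else:
--             selected.add(int(part))
--     final = sorted(page for page in selected if page in avail_set)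
--     if not final:
--         raise ValueError("요청한 페이지가 pages_structured에 없습니다.")
--     return final
-- ===== SOURCE B (Python) =====
-- def parse_pages_arg(pages_arg: str, available) -> list:
--     parts = [raw.strip() for raw in pages_arg.split(",")]
--
--     def wanted(p):
--         for part in parts:
--             if not part:
--                 continue
--             if "-" in part:
--                 s, e = part.split("-", 1)
--                 lo, hi = int(s), int(e)
--                 if lo > hi:
--                     lo, hi = hi, lo
--                 if lo <= p <= hi:
--                     return True
--             elif p == int(part):
--                 return True
--         return False
--
--     final = [p for p in sorted(set(available)) if wanted(p)]
--     if not final: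
--         raise ValueError("요청한 페이지가 pages_structured에 없습니다.")
--     return final
-- ===== Notes on version B (the rewrite author's own statement) =====
-- stated objective: alternative
-- what changed: B never builds a selected-page set: it sorts the distinct available pages first and keeps each page for which a per-page predicate, evaluated directly on the stripped comma-parts of the spec, matches a singleton or range part, whereas A expands every requested range into a set and sorts the filtered set afterwards; the same ValueError behaviour is kept and empty-result / unparsable inputs are outside Pre_.
import Mathlib
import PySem

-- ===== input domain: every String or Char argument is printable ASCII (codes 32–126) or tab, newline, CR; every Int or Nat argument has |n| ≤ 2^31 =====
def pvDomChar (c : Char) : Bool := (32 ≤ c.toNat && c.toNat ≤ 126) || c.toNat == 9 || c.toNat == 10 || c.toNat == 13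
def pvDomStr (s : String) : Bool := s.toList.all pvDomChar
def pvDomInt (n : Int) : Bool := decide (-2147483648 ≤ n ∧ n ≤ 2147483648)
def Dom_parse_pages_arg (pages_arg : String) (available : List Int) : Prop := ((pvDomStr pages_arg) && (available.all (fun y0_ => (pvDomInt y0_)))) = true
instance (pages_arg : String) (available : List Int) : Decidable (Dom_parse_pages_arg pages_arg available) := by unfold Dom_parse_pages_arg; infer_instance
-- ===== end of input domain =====

-- B sorts the distinct available pages first and keeps each page a per-page predicate on the
-- stripped spec parts accepts, instead of A's expanding every range into a set (alternative decomposition).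

-- ===== PORT A =====
-- loop body of A's 'for raw in pages_arg.split(",")' (none = a pending ValueError from int())
def pvStepA (acc : Option (PySem.Set Int)) (raw : String) : Option (PySem.Set Int) :=
  match acc with
  | none => none
  | some sel =>
    let part := PySem.Str.strip raw
    if part = "" then some sel
    else if PySem.Str.isIn "-" part then
      match PySem.Str.splitMax? part "-" 1 with
      | some [startStr, endStr] =>
        match PySem.Int.ofStr? startStr, PySem.Int.ofStr? endStr with
        | some s, some e =>
          let se := if s > e then (e, s) else (s, e)
          some (PySem.Set.update sel (PySem.List.pyRange se.1 (se.2 + 1) 1))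
        | _, _ => none
      | _ => none
    else
      match PySem.Int.ofStr? part with
      | some n => some (PySem.Set.add sel n)
      | none => none

def parse_pages_arg (pages_arg : String) (available : List Int) : List Int :=
  let availSet : PySem.Set Int := PySem.Set.ofList available
  match ((PySem.Str.split? pages_arg ",").getD []).foldl pvStepA (some PySem.Set.empty) with
  | none => []  -- int() raised ValueError: excluded by Pre_
  | some selected =>
    -- empty 'final' raises ValueError in Python: excluded by Pre_
    PySem.List.sorted (selected.filter (fun page => PySem.Set.contains availSet page)) (fun x => x) false

-- ===== PORT B =====
-- B's inner 'wanted' loop body: does the (already stripped) part select page p?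
-- (a part int() would raise on yields false here; such inputs are excluded by Pre_)
def pvWantedPart (p : Int) (part : String) : Bool :=
  if part = "" then false
  else if PySem.Str.isIn "-" part then
    match PySem.Str.splitMax? part "-" 1 with
    | some [sStr, eStr] =>
      match PySem.Int.ofStr? sStr, PySem.Int.ofStr? eStr with
      | some s, some e =>
        let lh := if s > e then (e, s) else (s, e)
        decide (lh.1 ≤ p ∧ p ≤ lh.2)
      | _, _ => false
    | _ => false
  else
    match PySem.Int.ofStr? part with
    | some n => p == n
    | none => false

def parse_pages_arg_alt (pages_arg : String) (available : List Int) : List Int :=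
  let parts := ((PySem.Str.split? pages_arg ",").getD []).map PySem.Str.strip
  -- empty 'final' raises ValueError in Python: excluded by Pre_
  (PySem.List.sorted (PySem.Set.ofList available) (fun x => x) false).filter
    (fun p => parts.any (pvWantedPart p))

-- ===== PRECONDITION & SPEC =====
-- a comma-part is one int() never raises on (empty/skipped, a valid int, or a '-'-split pair of valid ints)
def pvPartOk (raw : String) : Bool :=
  let part := PySem.Str.strip raw
  if part = "" then true
  else if PySem.Str.isIn "-" part then
    match PySem.Str.splitMax? part "-" 1 with
    | some [s1, s2] => (PySem.Int.ofStr? s1).isSome && (PySem.Int.ofStr? s2).isSome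
    | _ => false
  else (PySem.Int.ofStr? part).isSome

-- does the comma-part 'raw' request page p?
def pvSelects (raw : String) (p : Int) : Bool :=
  let part := PySem.Str.strip raw
  if part = "" then false
  else if PySem.Str.isIn "-" part then
    match PySem.Str.splitMax? part "-" 1 with
    | some [s1, s2] =>
      match PySem.Int.ofStr? s1, PySem.Int.ofStr? s2 with
      | some a, some b => decide (min a b ≤ p ∧ p ≤ max a b)
      | _, _ => false
    | _ => false
  else
    match PySem.Int.ofStr? part with
    | some n => p == n
    | _ => false

-- Pre_ excludes exactly the inputs on which Python A raises ValueError: a part int() rejects,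
-- or no requested page being available (A raises the Korean ValueError there).
def Pre_parse_pages_arg (pages_arg : String) (available : List Int) : Prop :=
  (((PySem.Str.split? pages_arg ",").getD []).all pvPartOk
    && available.any (fun p => ((PySem.Str.split? pages_arg ",").getD []).any (fun raw => pvSelects raw p))) = true
instance (pages_arg : String) (available : List Int) : Decidable (Pre_parse_pages_arg pages_arg available) := by unfold Pre_parse_pages_arg; infer_instance

def pvWitness_parse_pages_arg : String × List Int := ("1-3, 7", [2, 5, 7])

def Spec_parse_pages_arg (pages_arg : String) (available : List Int) (out : List Int) : Prop := out = parse_pages_arg_alt pages_arg available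
instance (pages_arg : String) (available : List Int) (out : List Int) : Decidable (Spec_parse_pages_arg pages_arg available out) := by unfold Spec_parse_pages_arg; infer_instance

-- ===== CLAIM (what is proved, stated in full; the proofs are below) =====
def Claim_equal_parse_pages_arg : Prop := ∀ (pages_arg : String) (available : List Int), Dom_parse_pages_arg pages_arg available → Pre_parse_pages_arg pages_arg available → Spec_parse_pages_arg pages_arg available (parse_pages_arg pages_arg available)

-- ===== LEMMAS AND PROOFS =====

set_option maxRecDepth 8192
set_option maxHeartbeats 1000000

-- one step of A's loop on a valid part: stays 'some', keeps Nodup, adds exactly the pages the part selects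
lemma stepA_ok (raw : String) (hok : pvPartOk raw = true) (s : PySem.Set Int) :
    ∃ t, pvStepA (some s) raw = some t ∧ (s.Nodup → t.Nodup) ∧
      ∀ p : Int, p ∈ t ↔ p ∈ s ∨ pvSelects raw p = true := by
  unfold pvPartOk at hok
  unfold pvStepA pvSelects
  simp only []
  split_ifs with h1 h2
  · exact ⟨s, rfl, id, by simp⟩
  · simp only [h1, h2, if_false, if_pos] at hok
    rcases hsp : PySem.Str.splitMax? (PySem.Str.strip raw) "-" 1 with _ | l
    · rw [hsp] at hok; simp at hok
    · rw [hsp] at hok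
      match l with
      | [] => simp at hok
      | [x] => simp at hok
      | x :: y :: z :: r => simp at hok
      | [s1, s2] =>
        rcases ha : PySem.Int.ofStr? s1 with _ | a
        · simp [ha] at hok
        rcases hb : PySem.Int.ofStr? s2 with _ | b
        · simp [ha, hb] at hok
        simp only [ha, hb]
        refine ⟨_, rfl, fun hn => PySem.Set.nodup_update _ _ hn, fun p => ?_⟩
        by_cases hab : a > b <;> by_cases hps : p ∈ s <;>
          simp [hab, hps, PySem.Set.mem_update, PySem.List.mem_pyRange_one] <;> omega
  · simp only [h1, h2, if_false] at hok
    rcases hn : PySem.Int.ofStr? (PySem.Str.strip raw) with _ | n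
    · rw [hn] at hok; simp at hok
    · refine ⟨_, rfl, fun hnd => PySem.Set.nodup_add _ _ hnd, fun p => ?_⟩
      rw [PySem.Set.mem_add]
      simp

-- A's whole loop on valid parts
lemma foldA_ok (parts : List String) (hok : parts.all pvPartOk = true) :
    ∀ s : PySem.Set Int, ∃ t, parts.foldl pvStepA (some s) = some t ∧ (s.Nodup → t.Nodup) ∧
      ∀ p : Int, p ∈ t ↔ p ∈ s ∨ parts.any (fun raw => pvSelects raw p) = true := by
  induction parts with
  | nil => intro s; exact ⟨s, rfl, id, by simp⟩
  | cons r rest ih =>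
    intro s
    simp only [List.all_cons, Bool.and_eq_true] at hok
    obtain ⟨t, ht, hnd, hmem⟩ := stepA_ok r hok.1 s
    obtain ⟨u, hu, hnd2, hmem2⟩ := ih hok.2 t
    refine ⟨u, by simp [ht, hu], fun h => hnd2 (hnd h), fun p => ?_⟩
    rw [hmem2, hmem]
    simp [or_assoc]

-- B's per-part predicate on the stripped part is exactly pvSelects on the raw part
lemma wantedPart_eq_selects (raw : String) (p : Int) :
    pvWantedPart p (PySem.Str.strip raw) = pvSelects raw p := by
  unfold pvWantedPart pvSelects
  by_cases h1 : PySem.Str.strip raw = ""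
  · rw [if_pos h1, if_pos h1]
  rw [if_neg h1, if_neg h1]
  by_cases h2 : PySem.Str.isIn "-" (PySem.Str.strip raw) = true
  · rw [if_pos h2, if_pos h2]
    rcases hsp : PySem.Str.splitMax? (PySem.Str.strip raw) "-" 1 with _ | l
    · rfl
    match l with
    | [] => rfl
    | [x] => rfl
    | x :: y :: z :: r => rfl
    | [s1, s2] =>
      rcases ha : PySem.Int.ofStr? s1 with _ | a
      · simp only [ha]
      rcases hb : PySem.Int.ofStr? s2 with _ | b
      · simp only [ha, hb]
      simp only [ha, hb]
      split_ifs with hab <;> (rw [decide_eq_decide]; omega)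
  · rw [if_neg h2, if_neg h2]
    cases PySem.Int.ofStr? (PySem.Str.strip raw) <;> rfl

-- ===== VERDICT (by name: the statement is the Claim_ definition above) =====
theorem parse_pages_arg_spec : Claim_equal_parse_pages_arg := by
  intro pages_arg available _hdom hpre
  unfold Pre_parse_pages_arg at hpre
  rw [Bool.and_eq_true] at hpre
  unfold Spec_parse_pages_arg parse_pages_arg parse_pages_arg_alt
  obtain ⟨t, ht, hndA, hmemA⟩ := foldA_ok _ hpre.1 PySem.Set.empty
  rw [ht]
  set raws := (PySem.Str.split? pages_arg ",").getD [] with hraws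
  have hq : ∀ p : Int, ((raws.map PySem.Str.strip).any (pvWantedPart p))
      = raws.any (fun raw => pvSelects raw p) := by
    intro p
    induction raws with
    | nil => rfl
    | cons r rest ih =>
      simp only [List.map_cons, List.any_cons, ih, wantedPart_eq_selects]
  set XS := t.filter (fun page => PySem.Set.contains (PySem.Set.ofList available) page) with hXS
  set R := (PySem.List.sorted (PySem.Set.ofList available) (fun x => x) false).filter
      (fun p => (raws.map PySem.Str.strip).any (pvWantedPart p)) with hR
  have hRpair : R.Pairwise (fun a b : Int => a < b) :=
    (PySem.List.sorted_ofList_pairwise_lt available).filter _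
  have hmemXS : ∀ p : Int, p ∈ XS ↔ p ∈ PySem.Set.ofList available ∧
      raws.any (fun raw => pvSelects raw p) = true := by
    intro p
    rw [hXS, List.mem_filter]
    have := hmemA p
    simp only [PySem.Set.empty, List.not_mem_nil, false_or] at this
    rw [this, PySem.Set.contains_iff]
    tauto
  have hmemR : ∀ p : Int, p ∈ R ↔ p ∈ PySem.Set.ofList available ∧
      raws.any (fun raw => pvSelects raw p) = true := by
    intro p
    rw [hR, List.mem_filter, PySem.List.mem_sorted, hq]
  have hndXS : XS.Nodup := List.Nodup.filter _ (hndA (List.nodup_nil))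
  have hndR : R.Nodup := List.Nodup.filter _
    ((PySem.List.sorted_perm (PySem.Set.ofList available) (fun x : Int => x) false).nodup_iff.2
      (PySem.Set.nodup_ofList available))
  have hperm : R.Perm XS := (List.perm_ext_iff_of_nodup hndR hndXS).2
    (fun p => (hmemR p).trans (hmemXS p).symm)
  exact PySem.List.sorted_eq_of_perm_of_pairwise_lt XS R (fun x : Int => x) hperm hRpair
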